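-- pv_equiv track=rewrite | github.com/takuron1996/python_algorithm | application/algorithm/komachi_calculation/arithmetic_processing.py | calc_empty
-- ===== SOURCE A (Python) =====
-- from enum import IntEnum
--
-- class Operator(IntEnum):
--     """演算子
--
--     Attributes:
--         EMPTY: 空白
--         ADD: 加算演算子
--         SUB: 減算演算子
--         MUL: 乗算演算子
--         DIV: 除算演算子
--     """
--
--     EMPTY = 0
--     ADD = 1
--     SUB = 2
--     MUL = 3
--     DIV = 4
--
--     @classmethod
--     def get_operator_method(cls, value: int):
--         """演算子に対応した関数を返却
--
--         Args:
--             value (int): 演算子の数値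
--
--         Returns:
--             演算子に対応した関数
--         """
--         operator = {
--             cls.ADD: lambda x, y: x + y,
--             cls.SUB: lambda x, y: x - y,
--             cls.MUL: lambda x, y: x * y,
--             cls.DIV: lambda x, y: x // y,
--         }
--         return operator.get(value)
--
-- def calc_empty(signs: list[int]):
--     """空白部分の計算処理
--
--     Args:
--         signs (list[int]): 演算子を数字で表現したリスト
--
--     Returns:
--         tuple(list[int], list[int]): (数値, 演算子)
--     """
--     new_vals = []
--     new_signs = []
--
--     # 途中経過の値（小町算の最初の値は1）
--     val = 1
--
--     for i in range(len(signs)):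
--         next_val = i + 2
--
--         if signs[i] == Operator.EMPTY:
--             val = val * 10 + next_val
--         else:
--             new_vals.append(val)
--             new_signs.append(signs[i])
--             val = next_val
--     new_vals.append(val)
--     return (new_vals, new_signs)
-- ===== SOURCE B (Python) =====
-- def calc_empty(signs):
--     """Segment-based reimplementation: find break positions, then fold each
--     digit range directly, instead of threading loop state through branches."""
--     n = len(signs)
--     breaks = [(i, s) for i, s in enumerate(signs) if s != 0]
--     bs = [i for i, _ in breaks]
--     new_vals = []
--     for a, e in zip([-1] + bs, bs + [n]):
--         acc = 0
--         for d in range(a + 2, e + 2):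
--             acc = acc * 10 + d
--         new_vals.append(acc)
--     return (new_vals, [s for _, s in breaks])
-- ===== Notes on version B (the rewrite author's own statement) =====
-- stated objective: alternative
-- what changed: B replaces A's single stateful loop (threading the running value and output lists through branches) by a segment decomposition: it first collects the break positions where the operator is non-empty, then folds each digit range between consecutive breaks independently.
import Mathlib
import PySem

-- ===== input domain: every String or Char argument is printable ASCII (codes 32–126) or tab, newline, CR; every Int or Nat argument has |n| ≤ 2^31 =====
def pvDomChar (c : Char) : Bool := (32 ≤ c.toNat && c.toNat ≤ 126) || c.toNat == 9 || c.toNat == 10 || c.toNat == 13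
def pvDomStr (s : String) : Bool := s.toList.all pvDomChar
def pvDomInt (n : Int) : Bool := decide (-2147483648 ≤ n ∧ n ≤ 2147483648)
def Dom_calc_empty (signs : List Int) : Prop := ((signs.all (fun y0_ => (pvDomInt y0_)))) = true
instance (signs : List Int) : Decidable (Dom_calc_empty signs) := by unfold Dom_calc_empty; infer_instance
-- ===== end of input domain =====

-- B regroups the komachi digits by break positions (independent per-segment folds) instead of A's single stateful loop; same O(n) cost, different decomposition.

-- ===== PORT A =====
-- A: for i in range(len(signs)): next_val = i + 2; branch on signs[i] == EMPTY (= 0),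
-- threading (new_vals, new_signs, val) through the loop; finally append val.
-- signs[i] is always in range here, so it is ported exactly as pyGetD signs i 0.
def calc_empty (signs : List Int) : List Int × List Int :=
  let st := (PySem.List.pyRange 0 (signs.length : Int) 1).foldl
    (fun (s : List Int × List Int × Int) i =>
      let next_val : Int := i + 2
      if PySem.List.pyGetD signs i 0 == 0 then
        (s.1, s.2.1, s.2.2 * 10 + next_val)
      else
        (s.1 ++ [s.2.2], s.2.1 ++ [PySem.List.pyGetD signs i 0], next_val))
    ([], [], 1)
  (st.1 ++ [st.2.2], st.2.1)

-- ===== PORT B =====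
-- B: breaks = positions with non-empty operator; each result value is the fold of the
-- digit range between consecutive breaks; result operators are the non-empty ones.
def calc_empty_alt (signs : List Int) : List Int × List Int :=
  let n : Int := signs.length
  let breaks := (PySem.List.enumerate signs 0).filter (fun p => p.2 != 0)
  let bs := breaks.map (fun p => p.1)
  let new_vals := (((-1 : Int) :: bs).zip (bs ++ [n])).map (fun ae =>
    (PySem.List.pyRange (ae.1 + 2) (ae.2 + 2) 1).foldl (fun acc d => acc * 10 + d) 0)
  (new_vals, breaks.map (fun p => p.2))

-- ===== PRECONDITION & SPEC =====
def Spec_calc_empty (signs : List Int) (out : List Int × List Int) : Prop := out = calc_empty_alt signs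
instance (signs : List Int) (out : List Int × List Int) : Decidable (Spec_calc_empty signs out) := by unfold Spec_calc_empty; infer_instance

-- ===== CLAIM (what is proved, stated in full; the proofs are below) =====
def Claim_equal_calc_empty : Prop := ∀ (signs : List Int), Dom_calc_empty signs → Spec_calc_empty signs (calc_empty signs)

-- ===== LEMMAS AND PROOFS =====

-- Common recursive specification: pvSpec signs i val, where val already contains the
-- digits of the current group (the group's last included digit is i + 1).
def pvSpec : List Int → Int → Int → List Int × List Int
  | [], _, val => ([val], [])
  | s :: rest, i, val =>
    if s == 0 then pvSpec rest (i + 1) (val * 10 + (i + 2))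
    else
      let r := pvSpec rest (i + 1) (i + 2)
      (val :: r.1, s :: r.2)

-- A's loop body on an (index, sign) pair.
def pvBody (s : List Int × List Int × Int) (p : Int × Int) : List Int × List Int × Int :=
  if p.2 == 0 then (s.1, s.2.1, s.2.2 * 10 + (p.1 + 2))
  else (s.1 ++ [s.2.2], s.2.1 ++ [p.2], p.1 + 2)

-- Value of the digit range [a, b) folded onto t.
def pvRV (a b t : Int) : Int := (PySem.List.pyRange a b 1).foldl (fun acc d => acc * 10 + d) t

-- Break positions / kept operators of `signs` enumerated from i.
def pvBs (signs : List Int) (i : Int) : List Int :=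
  ((PySem.List.enumerate signs i).filter (fun p => p.2 != 0)).map (fun p => p.1)

def pvSs (signs : List Int) (i : Int) : List Int :=
  ((PySem.List.enumerate signs i).filter (fun p => p.2 != 0)).map (fun p => p.2)

lemma pvRV_cons {a b : Int} (h : a < b) (t : Int) :
    pvRV a b t = pvRV (a + 1) b (t * 10 + a) := by
  simp [pvRV, PySem.List.pyRange_one_cons h]

lemma pvRV_nil {a b : Int} (h : b ≤ a) (t : Int) : pvRV a b t = t := by
  simp [pvRV, PySem.List.pyRange_one_eq_nil h]

lemma pvBs_ge (signs : List Int) (i : Int) : ∀ x ∈ pvBs signs i, i ≤ x := by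
  intro x hx
  simp only [pvBs, List.mem_map] at hx
  obtain ⟨p, hp, rfl⟩ := hx
  have hp' := List.mem_of_mem_filter hp
  rw [PySem.List.mem_enumerate_iff] at hp'
  obtain ⟨k, hk, rfl⟩ := hp'
  simp only
  omega

lemma pvHeadI_ge {l : List Int} {m i : Int} (hl : ∀ x ∈ l, i ≤ x) (hm : i ≤ m) :
    i ≤ (l ++ [m]).headI := by
  cases l with
  | nil => simpa using hm
  | cons x xs => simpa using hl x (by simp)

lemma pvZip_cons (x m : Int) (l : List Int) :
    ((x :: l).zip (l ++ [m])) = (x, (l ++ [m]).headI) :: l.zip (l.tail ++ [m]) := by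
  cases l <;> simp

-- A's fold over the enumerated suffix, with arbitrary accumulated output, equals pvSpec.
lemma pvA_fold : ∀ (signs : List Int) (i : Int) (vs ss : List Int) (val : Int),
    (((PySem.List.enumerate signs i).foldl pvBody (vs, ss, val)).1
       ++ [((PySem.List.enumerate signs i).foldl pvBody (vs, ss, val)).2.2],
     ((PySem.List.enumerate signs i).foldl pvBody (vs, ss, val)).2.1)
    = (vs ++ (pvSpec signs i val).1, ss ++ (pvSpec signs i val).2) := by
  intro signs
  induction signs with
  | nil => intro i vs ss val; simp [PySem.List.enumerate_nil, pvSpec]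
  | cons s rest ih =>
    intro i vs ss val
    rw [PySem.List.enumerate_cons]
    by_cases hs : (s == 0) = true
    · simp only [List.foldl_cons, pvBody, hs, if_true]
      rw [ih]
      simp [pvSpec, hs]
    · simp only [List.foldl_cons, pvBody, hs]
      rw [ih]
      simp only [pvSpec, hs]
      simp [List.append_assoc]

-- B's segment decomposition, generalized over the enumeration start, equals pvSpec.
lemma pvB_spec : ∀ (signs : List Int) (i t : Int),
    pvSpec signs i t =
      (pvRV (i + 2) ((pvBs signs i ++ [i + (signs.length : Int)]).headI + 2) t ::
        ((pvBs signs i).zip ((pvBs signs i).tail ++ [i + (signs.length : Int)])).map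
          (fun ae => pvRV (ae.1 + 2) (ae.2 + 2) 0),
       pvSs signs i) := by
  intro signs
  induction signs with
  | nil =>
    intro i t
    simp [pvSpec, pvBs, pvSs, PySem.List.enumerate_nil, pvRV_nil (le_refl (i + 2))]
  | cons s rest ih =>
    intro i t
    have hlen : i + ((s :: rest).length : Int) = (i + 1) + (rest.length : Int) := by
      simp; ring
    have he0 : i + 1 ≤ (pvBs rest (i + 1) ++ [(i + 1) + (rest.length : Int)]).headI :=
      pvHeadI_ge (pvBs_ge rest (i + 1)) (by omega)
    by_cases hs : (s == 0) = true
    · have h0 : s = 0 := by simpa using hs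
      subst h0
      have hbs : pvBs (0 :: rest) i = pvBs rest (i + 1) := by
        simp [pvBs, PySem.List.enumerate_cons]
      have hss : pvSs (0 :: rest) i = pvSs rest (i + 1) := by
        simp [pvSs, PySem.List.enumerate_cons]
      simp only [pvSpec]
      rw [if_pos hs]
      rw [ih, hbs, hss, hlen]
      rw [pvRV_cons (show i + 2 < (pvBs rest (i + 1) ++ [(i + 1) + (rest.length : Int)]).headI + 2 by omega) t]
      ring_nf
    · have h0 : s ≠ 0 := by simpa using hs
      have hbs : pvBs (s :: rest) i = i :: pvBs rest (i + 1) := by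
        simp [pvBs, PySem.List.enumerate_cons, h0]
      have hss : pvSs (s :: rest) i = s :: pvSs rest (i + 1) := by
        simp [pvSs, PySem.List.enumerate_cons, h0]
      simp only [pvSpec]
      rw [if_neg hs]
      rw [ih]
      rw [hbs, hss, hlen]
      simp only [List.cons_append, List.headI_cons, List.tail_cons]
      rw [pvZip_cons]
      simp only [List.map_cons]
      rw [pvRV_nil (le_refl (i + 2)) t]
      rw [pvRV_cons (show i + 2 < (pvBs rest (i + 1) ++ [(i + 1) + (rest.length : Int)]).headI + 2 by omega) 0]
      ring_nf

lemma pvA_eq_spec (signs : List Int) : calc_empty signs = pvSpec signs 0 1 := by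
  have h := pvA_fold signs 0 [] [] 1
  rw [PySem.List.enumerate_eq_map_pyRange (d := 0), List.foldl_map] at h
  simp only [pvBody] at h
  simp only [List.nil_append] at h
  unfold calc_empty
  exact h

-- The first segment fold started at digit 1 with accumulator 0 equals starting at 2 with 1.
lemma pvRV_head (e : Int) (he : 0 ≤ e) :
    (PySem.List.pyRange 1 (e + 2) 1).foldl (fun acc d => acc * 10 + d) 0
    = (PySem.List.pyRange 2 (e + 2) 1).foldl (fun acc d => acc * 10 + d) 1 := by
  rw [PySem.List.pyRange_one_cons (show (1 : Int) < e + 2 by omega)]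
  norm_num

lemma pvB_eq_spec (signs : List Int) : calc_empty_alt signs = pvSpec signs 0 1 := by
  have he0 : (0 : Int) ≤ (pvBs signs 0 ++ [(signs.length : Int)]).headI :=
    pvHeadI_ge (pvBs_ge signs 0) (Int.natCast_nonneg _)
  rw [pvB_spec signs 0 1]
  simp only [calc_empty_alt]
  rw [pvZip_cons]
  simp only [List.map_cons, pvRV, pvBs, pvSs]
  norm_num
  rw [pvRV_head _ (by simpa [pvBs] using he0)]

-- ===== VERDICT (by name: the statement is the Claim_ definition above) =====
theorem calc_empty_spec : Claim_equal_calc_empty := by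
  intro signs _
  unfold Spec_calc_empty
  rw [pvA_eq_spec, pvB_eq_spec]
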